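-- pv_equiv track=rewrite | github.com/qvad/pmca | pmca/utils/assembler.py | _split_imports
-- ===== SOURCE A (Python) =====
-- def _split_imports(code: str) -> tuple[list[str], str]:
--     """Split code into import lines and the rest (body)."""
--     import_lines: list[str] = []
--     body_lines: list[str] = []
--     in_body = False
--
--     for line in code.splitlines():
--         stripped = line.strip()
--         if not in_body and (
--             stripped.startswith("import ")
--             or stripped.startswith("from ")
--         ):
--             import_lines.append(stripped)
--         elif not in_body and stripped == "":
--             # skip blank lines between imports
--             continue
--         else:
--             in_body = True
--             body_lines.append(line)
--
--     return import_lines, "\n".join(body_lines)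
-- ===== SOURCE B (Python) =====
-- def _split_imports(code: str) -> tuple[list[str], str]:
--     """Split code into import lines and the rest (body)."""
--     lines = code.splitlines()
--
--     def is_header(line: str) -> bool:
--         s = line.strip()
--         return s == "" or s.startswith("import ") or s.startswith("from ")
--
--     k = next((i for i, line in enumerate(lines) if not is_header(line)), len(lines))
--     import_lines = [s for s in (line.strip() for line in lines[:k]) if s]
--     return import_lines, "\n".join(lines[k:])
-- ===== Notes on version B (the rewrite author's own statement) =====
-- stated objective: alternative
-- what changed: B replaces A's single streaming pass with a flag and two growing accumulators by staged passes: locate the first non-header line with an enumerate/next search, then build the import list by a map-strip + filter comprehension over the prefix and join the suffix slice as the body.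
import Mathlib
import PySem

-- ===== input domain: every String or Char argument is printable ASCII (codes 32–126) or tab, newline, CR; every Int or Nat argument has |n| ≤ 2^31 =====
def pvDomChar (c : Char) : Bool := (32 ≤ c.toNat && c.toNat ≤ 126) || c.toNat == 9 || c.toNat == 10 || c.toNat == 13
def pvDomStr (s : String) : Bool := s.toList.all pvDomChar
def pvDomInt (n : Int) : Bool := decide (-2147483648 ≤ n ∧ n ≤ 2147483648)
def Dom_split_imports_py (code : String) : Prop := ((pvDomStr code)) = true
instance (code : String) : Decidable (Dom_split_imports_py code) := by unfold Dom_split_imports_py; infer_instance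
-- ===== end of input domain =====

-- B replaces A's flag-controlled streaming pass by staged passes: find the boundary index,
-- then build the import list by map+filter over the prefix and join the suffix (alternative, same cost).

-- ===== PORT A =====
-- state: (import_lines, body_lines, in_body)
def pvStepA (st : List String × List String × Bool) (line : String) :
    List String × List String × Bool :=
  let stripped := PySem.Str.strip line
  if !st.2.2 && (PySem.Str.startswith stripped "import " || PySem.Str.startswith stripped "from ") then
    (st.1 ++ [stripped], st.2.1, st.2.2)
  else if !st.2.2 && (stripped == "") then
    st
  else
    (st.1, st.2.1 ++ [line], true)

def split_imports_py (code : String) : List String × String :=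
  let r := (PySem.Str.splitlines code).foldl pvStepA ([], [], false)
  (r.1, PySem.Str.join "\n" r.2.1)

-- ===== PORT B =====
def pvIsHeader (line : String) : Bool :=
  let s := PySem.Str.strip line
  s == "" || PySem.Str.startswith s "import " || PySem.Str.startswith s "from "

def split_imports_py_alt (code : String) : List String × String :=
  let lines := PySem.Str.splitlines code
  -- k = next((i for i, line in enumerate(lines) if not is_header(line)), len(lines))
  let k := lines.findIdx (fun l => !pvIsHeader l)
  let import_lines := ((lines.take k).map PySem.Str.strip).filter (fun s => s != "")
  (import_lines, PySem.Str.join "\n" (lines.drop k))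

-- ===== PRECONDITION & SPEC =====
def Spec_split_imports_py (code : String) (out : List String × String) : Prop := out = split_imports_py_alt code
instance (code : String) (out : List String × String) : Decidable (Spec_split_imports_py code out) := by unfold Spec_split_imports_py; infer_instance

-- ===== CLAIM =====
def Claim_equal_split_imports_py : Prop := ∀ (code : String), Dom_split_imports_py code → Spec_split_imports_py code (split_imports_py code)

-- ===== LEMMAS AND PROOFS =====

-- once in_body is set, A appends every remaining line verbatim
theorem pvFoldA_true (ls : List String) (imps body : List String) :
    ls.foldl pvStepA (imps, body, true) = (imps, body ++ ls, true) := by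
  induction ls generalizing body with
  | nil => simp
  | cons l ls ih => simp [pvStepA, ih]

-- in the header phase A's fold computes exactly B's staged decomposition
theorem pvFoldA_false (ls : List String) (imps : List String) :
    ls.foldl pvStepA (imps, [], false) =
      (imps ++ ((ls.take (ls.findIdx (fun l => !pvIsHeader l))).map PySem.Str.strip).filter
          (fun s => s != ""),
        ls.drop (ls.findIdx (fun l => !pvIsHeader l)),
        !(ls.drop (ls.findIdx (fun l => !pvIsHeader l))).isEmpty) := by
  induction ls generalizing imps with
  | nil => simp
  | cons l ls ih =>
    by_cases hh : pvIsHeader l = true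
    · have hk : (l :: ls).findIdx (fun l => !pvIsHeader l) =
          ls.findIdx (fun l => !pvIsHeader l) + 1 := by
        simp [List.findIdx_cons, hh]
      rw [hk]
      by_cases hb : PySem.Str.strip l == ""
      · have hsw : (PySem.Str.startswith (PySem.Str.strip l) "import "
            || PySem.Str.startswith (PySem.Str.strip l) "from ") = false := by
          rw [eq_of_beq hb]; decide
        simp only [List.foldl_cons, pvStepA, hsw, hb, List.take_succ_cons, List.drop_succ_cons,
          List.map_cons, List.filter_cons]
        simp only [Bool.and_true, Bool.not_false,
          Bool.true_and, if_true]
        rw [eq_of_beq hb]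
        simpa using ih imps
      · have hsw : (PySem.Str.startswith (PySem.Str.strip l) "import "
            || PySem.Str.startswith (PySem.Str.strip l) "from ") = true := by
          have := hh; unfold pvIsHeader at this; simp only [hb] at this; simpa using this
        simp only [List.foldl_cons, pvStepA, hsw, List.take_succ_cons, List.drop_succ_cons,
          List.map_cons, List.filter_cons]
        simp only [Bool.not_false, Bool.true_and, if_true]
        rw [ih (imps ++ [PySem.Str.strip l])]
        have hb' : ¬ PySem.Str.strip l = "" := fun h => hb (by simp [h])
        simp [hb']
    · have hk : (l :: ls).findIdx (fun l => !pvIsHeader l) = 0 := by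
        simp [List.findIdx_cons, hh]
      have hh' : (PySem.Str.strip l == "" || (PySem.Str.startswith (PySem.Str.strip l) "import "
          || PySem.Str.startswith (PySem.Str.strip l) "from ")) = false := by
        rw [← Bool.or_assoc]
        exact Bool.not_eq_true _ ▸ (by simpa [pvIsHeader] using hh)
      rw [Bool.or_eq_false_iff] at hh'
      have hb : (PySem.Str.strip l == "") = false := hh'.1
      have hsw : (PySem.Str.startswith (PySem.Str.strip l) "import "
          || PySem.Str.startswith (PySem.Str.strip l) "from ") = false := hh'.2
      rw [hk]
      simp only [List.foldl_cons, pvStepA, hsw, hb]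
      simp [pvFoldA_true]

-- ===== VERDICT =====
theorem split_imports_py_spec : Claim_equal_split_imports_py := by
  intro code _
  unfold Spec_split_imports_py split_imports_py split_imports_py_alt
  simp [pvFoldA_false]
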